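-- pv_equiv track=rewrite | github.com/devuming/al_python | 01.py | solution
-- ===== SOURCE A (Python) =====
-- def solution(n, horizontal):
--     answer = [[0] * n for _ in range(n)]       # 몇번째로 청소되었는지 표기
--     n_sum = sum(range(1, n * n + 1)) # 총합
--
--     step = 1
--     r = 0
--     c = 0
--     answer[r][c] = step
--     step += 1
--
--     while r + 1 < n and c + 1 < n:
--         # 방향으로 한칸 이동
--         if horizontal:
--             c = c + 1
--         else:
--             r = r + 1
--
--         answer[r][c] = step
--         step += 1
--
--         max_n = max(r, c)   # 행과 열의 max
--
--         # 1
--         for m in range(0, max_n):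
--             if horizontal :    # h == T : 오른쪽으로 이동
--                 r += 1
--
--             if not horizontal: # h == F : 아래로 이동
--                 c += 1
--
--             answer[r][c] = step
--             step += 1
--
--         # 2
--         for m in range(max_n, 0, -1):
--             if horizontal:      # h == T : 왼쪽으로 이동
--                 c -= 1
--
--             if not horizontal:  # h == F : 위로 이동
--                 r -= 1
--
--             answer[r][c] = step
--             step += 1
--
--         # 방향 변경
--         horizontal = not horizontal
--
--     return answer
-- ===== SOURCE B (Python) =====
-- def solution(n, horizontal):
--     # Closed form: the cell at (r, c) lies in gnomon layer k = max(r, c); layer k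
--     # holds steps k*k+1 .. (k+1)**2, walked down-then-left or right-then-up
--     # depending on the layer's alternating direction.
--     def step_at(r, c):
--         k = max(r, c)
--         if k == 0:
--             return 1
--         d = horizontal if k % 2 == 1 else not horizontal
--         if d:
--             idx = r if c == k else 2 * k - c
--         else:
--             idx = c if r == k else 2 * k - r
--         return k * k + 1 + idx
--     return [[step_at(r, c) for c in range(n)] for r in range(n)]
-- ===== Notes on version B (the rewrite author's own statement) =====
-- stated objective: alternative
-- what changed: A simulates a cursor walking the grid cell by cell with a while-loop, two inner for-loops and mutable direction state; B computes each cell's step number directly from a closed form (layer k = max(r,c), alternating layer direction, index within the layer) and builds the grid with one nested comprehension.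
import Mathlib
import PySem

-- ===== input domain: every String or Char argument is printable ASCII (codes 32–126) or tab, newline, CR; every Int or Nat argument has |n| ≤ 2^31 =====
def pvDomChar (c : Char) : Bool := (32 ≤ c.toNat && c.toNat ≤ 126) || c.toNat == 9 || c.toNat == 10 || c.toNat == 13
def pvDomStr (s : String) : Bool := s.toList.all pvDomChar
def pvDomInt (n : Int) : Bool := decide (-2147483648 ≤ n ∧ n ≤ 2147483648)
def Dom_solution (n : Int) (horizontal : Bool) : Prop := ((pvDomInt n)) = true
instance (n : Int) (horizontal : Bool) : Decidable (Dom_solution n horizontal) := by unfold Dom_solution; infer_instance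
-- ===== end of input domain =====

-- B replaces A's stateful cursor walk by a per-cell closed form (alternative decomposition, same O(n^2) cost).

-- ===== PORT A =====
-- answer[r][c] = v (indices are always in range when A runs without exception)
def pySet2 (g : List (List Int)) (r c v : Int) : List (List Int) :=
  PySem.List.pySetD g r (PySem.List.pySetD (PySem.List.pyGetD g r []) c v)

-- one step of A's first inner for-loop (state: answer, step, r, c)
def innStep1 (h : Bool) (st : List (List Int) × Int × Int × Int) : List (List Int) × Int × Int × Int :=
  match st with
  | (ans, step, r, c) =>
    let r := if h then r + 1 else r
    let c := if !h then c + 1 else c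
    (pySet2 ans r c step, step + 1, r, c)

-- one step of A's second inner for-loop
def innStep2 (h : Bool) (st : List (List Int) × Int × Int × Int) : List (List Int) × Int × Int × Int :=
  match st with
  | (ans, step, r, c) =>
    let c := if h then c - 1 else c
    let r := if !h then r - 1 else r
    (pySet2 ans r c step, step + 1, r, c)

-- A's while-loop; the fuel n.toNat only makes the recursion total (the loop runs < n times)
def loopA (fuel : Nat) (n : Int) (ans : List (List Int)) (step r c : Int) (h : Bool) : List (List Int) :=
  match fuel with
  | 0 => ans
  | f + 1 =>
    if r + 1 < n ∧ c + 1 < n then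
      let c := if h then c + 1 else c
      let r := if h then r else r + 1
      let ans := pySet2 ans r c step
      let step := step + 1
      let maxn := max r c
      let s2 := (PySem.List.pyRange 0 maxn 1).foldl (fun st _ => innStep1 h st) (ans, step, r, c)
      let s3 := (PySem.List.pyRange maxn 0 (-1)).foldl (fun st _ => innStep2 h st) s2
      loopA f n s3.1 s3.2.1 s3.2.2.1 s3.2.2.2 (!h)
    else ans

def solution (n : Int) (horizontal : Bool) : List (List Int) :=
  let answer := List.replicate n.toNat (List.replicate n.toNat 0)
  let _n_sum := (PySem.List.pyRange 1 (n * n + 1) 1).foldl (· + ·) 0   -- n_sum, unused in A too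
  let step : Int := 1
  let answer := pySet2 answer 0 0 step
  let step := step + 1
  loopA n.toNat n answer step 0 0 horizontal

-- ===== PORT B =====
def stepAt (horizontal : Bool) (r c : Int) : Int :=
  let k := max r c
  if k = 0 then 1
  else
    let d := if k % 2 = 1 then horizontal else !horizontal
    let idx := if d then (if c = k then r else 2 * k - c)
               else (if r = k then c else 2 * k - r)
    k * k + 1 + idx

def solution_alt (n : Int) (horizontal : Bool) : List (List Int) :=
  (PySem.List.pyRange 0 n 1).map fun r =>
    (PySem.List.pyRange 0 n 1).map fun c => stepAt horizontal r c

-- ===== PRECONDITION & SPEC =====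
-- Pre_ excludes exactly n ≤ 0, where A raises IndexError (answer[0][0] on an empty grid).
def Pre_solution (n : Int) (horizontal : Bool) : Prop := 1 ≤ n
instance (n : Int) (horizontal : Bool) : Decidable (Pre_solution n horizontal) := by unfold Pre_solution; infer_instance
def pvWitness_solution : Int × Bool := (3, true)

def Spec_solution (n : Int) (horizontal : Bool) (out : List (List Int)) : Prop := out = solution_alt n horizontal
instance (n : Int) (horizontal : Bool) (out : List (List Int)) : Decidable (Spec_solution n horizontal out) := by unfold Spec_solution; infer_instance

-- ===== CLAIM (what is proved, stated in full; the proofs are below) =====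
def Claim_equal_solution : Prop := ∀ (n : Int) (horizontal : Bool), Dom_solution n horizontal → Pre_solution n horizontal → Spec_solution n horizontal (solution n horizontal)

-- ===== LEMMAS AND PROOFS =====

-- an N×N grid given by a cell function
def gridOf (N : Nat) (f : Nat → Nat → Int) : List (List Int) :=
  (List.range N).map fun r => (List.range N).map fun c => f r c

-- direction of gnomon layer k
def dDir (h : Bool) (k : Int) : Bool := if k % 2 = 1 then h else !h

-- 0-based index of cell (r,c) inside its layer k, for direction d
def lidx (d : Bool) (k r c : Int) : Int :=
  if d then (if c = k then r else 2 * k - c) else (if r = k then c else 2 * k - r)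

-- grid state: layers < k complete, first p cells of layer k written
def Pf (h : Bool) (k p : Int) : Nat → Nat → Int := fun r c =>
  if max (r : Int) (c : Int) < k then stepAt h r c
  else if max (r : Int) (c : Int) = k ∧ lidx (dDir h k) k r c < p then stepAt h r c
  else 0

lemma foldl_const {α β : Type} (l : List α) (g : β → β) (s : β) :
    l.foldl (fun st _ => g st) s = g^[l.length] s := by
  induction l generalizing s with
  | nil => rfl
  | cons a l ih => simp [List.foldl_cons, ih, Function.iterate_succ_apply]

lemma innStep1t (ans : List (List Int)) (s r c : Int) :
    innStep1 true (ans, s, r, c) = (pySet2 ans (r + 1) c s, s + 1, r + 1, c) := rfl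

lemma innStep1f (ans : List (List Int)) (s r c : Int) :
    innStep1 false (ans, s, r, c) = (pySet2 ans r (c + 1) s, s + 1, r, c + 1) := rfl

lemma innStep2t (ans : List (List Int)) (s r c : Int) :
    innStep2 true (ans, s, r, c) = (pySet2 ans r (c - 1) s, s + 1, r, c - 1) := rfl

lemma innStep2f (ans : List (List Int)) (s r c : Int) :
    innStep2 false (ans, s, r, c) = (pySet2 ans (r - 1) c s, s + 1, r - 1, c) := rfl

lemma set_map_range {α : Type} (N : Nat) (g : Nat → α) (i : Nat) (v : α) :
    ((List.range N).map g).set i v = (List.range N).map (fun j => if j = i then v else g j) := by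
  apply List.ext_getElem (by simp)
  intro j hj1 hj2
  simp only [List.length_map, List.length_range] at hj1 hj2
  rw [List.getElem_set]
  simp only [List.getElem_map, List.getElem_range]
  split_ifs with h1 h2 h2
  · rfl
  · exact absurd h1.symm h2
  · exact absurd h2.symm h1
  · rfl

lemma gridOf_congr (N : Nat) (f g : Nat → Nat → Int)
    (h : ∀ r < N, ∀ c < N, f r c = g r c) : gridOf N f = gridOf N g := by
  unfold gridOf
  apply List.map_congr_left
  intro r hr
  apply List.map_congr_left
  intro c hc
  exact h r (List.mem_range.1 hr) c (List.mem_range.1 hc)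

lemma pySet2_gridOf (N : Nat) (f : Nat → Nat → Int) (r c : Int)
    (hr0 : 0 ≤ r) (hr : r < N) (hc0 : 0 ≤ c) (hc : c < N) (v : Int) :
    pySet2 (gridOf N f) r c v
      = gridOf N (fun a b => if a = r.toNat ∧ b = c.toNat then v else f a b) := by
  have hrow : PySem.List.pyGetD (gridOf N f) r [] = (List.range N).map (f r.toNat) := by
    rw [PySem.List.pyGetD_of_nonneg _ _ hr0]
    unfold gridOf
    rw [List.getD_eq_getElem _ _ (by simp; omega)]
    simp
  unfold pySet2
  rw [hrow, PySem.List.pySetD_of_nonneg _ _ hc0, set_map_range,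
      PySem.List.pySetD_of_nonneg _ _ hr0]
  unfold gridOf
  rw [set_map_range]
  apply List.map_congr_left
  intro a ha
  by_cases hae : a = r.toNat
  · subst hae
    rw [if_pos rfl]
    apply List.map_congr_left
    intro b hb
    by_cases hbe : b = c.toNat
    · simp [hbe]
    · simp [hbe]
  · rw [if_neg hae]
    apply List.map_congr_left
    intro b hb
    show f a b = if a = r.toNat ∧ b = c.toNat then v else f a b
    rw [if_neg (by tauto)]

lemma stepAt_of_max (h : Bool) (k r c : Int) (hk : 1 ≤ k) (hm : max r c = k) :
    stepAt h r c = k * k + 1 + lidx (dDir h k) k r c := by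
  simp only [stepAt, lidx, dDir, hm, if_neg (by omega : ¬ k = 0)]
  rfl

lemma dDir_succ (h : Bool) (k : Int) : dDir h (k + 1) = !dDir h k := by
  unfold dDir
  split_ifs with h1 h2 h2
  · omega
  · simp
  · rfl
  · omega

-- writing the p-th cell of layer k advances the partial-grid function by one
lemma Pf_write (hb d : Bool) (k : Int) (hk : 1 ≤ k) (hd : dDir hb k = d)
    (p : Int) (hp0 : 0 ≤ p) (hpk : p ≤ 2 * k)
    (wr wc : Int) (hwr : 0 ≤ wr) (hwc : 0 ≤ wc)
    (hmax : max wr wc = k) (hl : lidx d k wr wc = p) :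
    (fun a b => if a = wr.toNat ∧ b = wc.toNat then k * k + 1 + p else Pf hb k p a b)
      = Pf hb k (p + 1) := by
  have hwrk : wr ≤ k := hmax ▸ le_max_left _ _
  have hwck : wc ≤ k := hmax ▸ le_max_right _ _
  have hwor : wr = k ∨ wc = k := by
    rcases max_choice wr wc with hx | hx <;> omega
  funext a b
  have hwr' : (wr.toNat : Int) = wr := by omega
  have hwc' : (wc.toNat : Int) = wc := by omega
  by_cases hcell : a = wr.toNat ∧ b = wc.toNat
  · obtain ⟨rfl, rfl⟩ := hcell
    rw [if_pos ⟨rfl, rfl⟩]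
    simp only [Pf, hwr', hwc', hd]
    rw [if_neg (by rw [hmax]; omega), if_pos ⟨hmax, by rw [hl]; omega⟩,
        stepAt_of_max hb k wr wc hk hmax, hd, hl]
  · rw [if_neg hcell]
    simp only [Pf, hd]
    by_cases h1 : max (a : Int) (b : Int) < k
    · rw [if_pos h1, if_pos h1]
    · rw [if_neg h1, if_neg h1]
      by_cases h2 : max (a : Int) (b : Int) = k
      · have hak : (a : Int) ≤ k := h2 ▸ le_max_left _ _
        have hbk : (b : Int) ≤ k := h2 ▸ le_max_right _ _
        have haob : (a : Int) = k ∨ (b : Int) = k := by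
          rcases max_choice ((a : Int)) ((b : Int)) with hx | hx <;> omega
        have hne : lidx d k (a : Int) (b : Int) ≠ p := by
          intro he
          apply hcell
          unfold lidx at he hl
          cases d
          · rw [if_neg Bool.false_ne_true] at he hl
            split_ifs at he hl <;> constructor <;> omega
          · rw [if_pos rfl] at he hl
            split_ifs at he hl <;> constructor <;> omega
        by_cases h3 : lidx d k (a : Int) (b : Int) < p
        · rw [if_pos ⟨h2, h3⟩, if_pos ⟨h2, by omega⟩]
        · rw [if_neg (by tauto), if_neg (by rintro ⟨-, h4⟩; omega)]
      · rw [if_neg (by tauto), if_neg (by tauto)]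

lemma iter1t (N : Nat) (hb : Bool) (k : Int) (hk : 1 ≤ k) (hkN : k < (N : Int))
    (hd : dDir hb k = true) :
    ∀ j : Nat, (j : Int) ≤ k →
      (fun st => innStep1 true st)^[j] (gridOf N (Pf hb k 1), k * k + 2, 0, k)
        = (gridOf N (Pf hb k (1 + (j : Int))), k * k + 2 + (j : Int), (j : Int), k) := by
  intro j
  induction j with
  | zero => intro _; norm_num
  | succ j ih =>
    intro hj
    have hj' : (j : Int) ≤ k := by omega
    have hjk : (j : Int) + 1 ≤ k := by omega
    rw [Function.iterate_succ_apply', ih hj', innStep1t]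
    rw [pySet2_gridOf N _ ((j : Int) + 1) k (by omega) (by omega) (by omega) (by omega)]
    rw [show k * k + 2 + (j : Int) = k * k + 1 + (1 + (j : Int)) by ring]
    rw [Pf_write hb true k hk hd (1 + (j : Int)) (by omega) (by omega)
          ((j : Int) + 1) k (by omega) (by omega) (max_eq_right hjk)
          (by unfold lidx; rw [if_pos rfl, if_pos rfl]; ring)]
    rw [show (1 : Int) + (j : Int) + 1 = 1 + ((j + 1 : Nat) : Int) by push_cast; ring,
        show k * k + 1 + (1 + (j : Int)) + 1 = k * k + 2 + ((j + 1 : Nat) : Int) by push_cast; ring,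
        show (j : Int) + 1 = ((j + 1 : Nat) : Int) by push_cast; ring]

lemma iter1f (N : Nat) (hb : Bool) (k : Int) (hk : 1 ≤ k) (hkN : k < (N : Int))
    (hd : dDir hb k = false) :
    ∀ j : Nat, (j : Int) ≤ k →
      (fun st => innStep1 false st)^[j] (gridOf N (Pf hb k 1), k * k + 2, k, 0)
        = (gridOf N (Pf hb k (1 + (j : Int))), k * k + 2 + (j : Int), k, (j : Int)) := by
  intro j
  induction j with
  | zero => intro _; norm_num
  | succ j ih =>
    intro hj
    have hj' : (j : Int) ≤ k := by omega
    have hjk : (j : Int) + 1 ≤ k := by omega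
    rw [Function.iterate_succ_apply', ih hj', innStep1f]
    rw [pySet2_gridOf N _ k ((j : Int) + 1) (by omega) (by omega) (by omega) (by omega)]
    rw [show k * k + 2 + (j : Int) = k * k + 1 + (1 + (j : Int)) by ring]
    rw [Pf_write hb false k hk hd (1 + (j : Int)) (by omega) (by omega)
          k ((j : Int) + 1) (by omega) (by omega) (max_eq_left hjk)
          (by unfold lidx; rw [if_neg Bool.false_ne_true, if_pos rfl]; ring)]
    rw [show (1 : Int) + (j : Int) + 1 = 1 + ((j + 1 : Nat) : Int) by push_cast; ring,
        show k * k + 1 + (1 + (j : Int)) + 1 = k * k + 2 + ((j + 1 : Nat) : Int) by push_cast; ring,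
        show (j : Int) + 1 = ((j + 1 : Nat) : Int) by push_cast; ring]

lemma iter2t (N : Nat) (hb : Bool) (k : Int) (hk : 1 ≤ k) (hkN : k < (N : Int))
    (hd : dDir hb k = true) :
    ∀ j : Nat, (j : Int) ≤ k →
      (fun st => innStep2 true st)^[j] (gridOf N (Pf hb k (k + 1)), k * k + k + 2, k, k)
        = (gridOf N (Pf hb k (k + 1 + (j : Int))), k * k + k + 2 + (j : Int), k, k - (j : Int)) := by
  intro j
  induction j with
  | zero => intro _; norm_num
  | succ j ih =>
    intro hj
    have hj' : (j : Int) ≤ k := by omega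
    have hjk : (j : Int) + 1 ≤ k := by omega
    rw [Function.iterate_succ_apply', ih hj', innStep2t]
    rw [pySet2_gridOf N _ k (k - (j : Int) - 1) (by omega) (by omega) (by omega) (by omega)]
    rw [show k * k + k + 2 + (j : Int) = k * k + 1 + (k + 1 + (j : Int)) by ring]
    rw [Pf_write hb true k hk hd (k + 1 + (j : Int)) (by omega) (by omega)
          k (k - (j : Int) - 1) (by omega) (by omega) (max_eq_left (by omega))
          (by unfold lidx; rw [if_pos rfl, if_neg (by omega)]; ring)]
    rw [show k + 1 + (j : Int) + 1 = k + 1 + ((j + 1 : Nat) : Int) by push_cast; ring,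
        show k * k + 1 + (k + 1 + (j : Int)) + 1 = k * k + k + 2 + ((j + 1 : Nat) : Int) by push_cast; ring,
        show k - (j : Int) - 1 = k - ((j + 1 : Nat) : Int) by push_cast; ring]

lemma iter2f (N : Nat) (hb : Bool) (k : Int) (hk : 1 ≤ k) (hkN : k < (N : Int))
    (hd : dDir hb k = false) :
    ∀ j : Nat, (j : Int) ≤ k →
      (fun st => innStep2 false st)^[j] (gridOf N (Pf hb k (k + 1)), k * k + k + 2, k, k)
        = (gridOf N (Pf hb k (k + 1 + (j : Int))), k * k + k + 2 + (j : Int), k - (j : Int), k) := by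
  intro j
  induction j with
  | zero => intro _; norm_num
  | succ j ih =>
    intro hj
    have hj' : (j : Int) ≤ k := by omega
    have hjk : (j : Int) + 1 ≤ k := by omega
    rw [Function.iterate_succ_apply', ih hj', innStep2f]
    rw [pySet2_gridOf N _ (k - (j : Int) - 1) k (by omega) (by omega) (by omega) (by omega)]
    rw [show k * k + k + 2 + (j : Int) = k * k + 1 + (k + 1 + (j : Int)) by ring]
    rw [Pf_write hb false k hk hd (k + 1 + (j : Int)) (by omega) (by omega)
          (k - (j : Int) - 1) k (by omega) (by omega) (max_eq_right (by omega))
          (by unfold lidx; rw [if_neg Bool.false_ne_true, if_neg (by omega)]; ring)]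
    rw [show k + 1 + (j : Int) + 1 = k + 1 + ((j + 1 : Nat) : Int) by push_cast; ring,
        show k * k + 1 + (k + 1 + (j : Int)) + 1 = k * k + k + 2 + ((j + 1 : Nat) : Int) by push_cast; ring,
        show k - (j : Int) - 1 = k - ((j + 1 : Nat) : Int) by push_cast; ring]

lemma Pf_complete (hb : Bool) (k : Int) (hk : 1 ≤ k) :
    Pf hb k (2 * k + 1) = Pf hb (k + 1) 0 := by
  funext a b
  simp only [Pf]
  by_cases h1 : max (a : Int) (b : Int) < k
  · rw [if_pos h1, if_pos (by omega : max (a : Int) (b : Int) < k + 1)]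
  · rw [if_neg h1]
    by_cases h2 : max (a : Int) (b : Int) = k
    · have hak : (a : Int) ≤ k := h2 ▸ le_max_left _ _
      have hbk : (b : Int) ≤ k := h2 ▸ le_max_right _ _
      have hlt : lidx (dDir hb k) k (a : Int) (b : Int) < 2 * k + 1 := by
        unfold lidx
        split_ifs <;> omega
      rw [if_pos ⟨h2, hlt⟩, if_pos (by omega : max (a : Int) (b : Int) < k + 1)]
    · rw [if_neg (fun hx => h2 hx.1),
          if_neg (by omega : ¬ max (a : Int) (b : Int) < k + 1)]
      rw [if_neg ?_]
      rintro ⟨hm, hl⟩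
      have hak : (a : Int) ≤ k + 1 := hm ▸ le_max_left _ _
      have hbk : (b : Int) ≤ k + 1 := hm ▸ le_max_right _ _
      revert hl
      unfold lidx
      split_ifs <;> omega

lemma Pf_full (hb : Bool) (n t : Int) (h : n ≤ t + 1) :
    gridOf n.toNat (Pf hb (t + 1) 0) = gridOf n.toNat (fun a b => stepAt hb a b) := by
  apply gridOf_congr
  intro r hr c hc
  simp only [Pf]
  rw [if_pos (max_lt_iff.mpr ⟨by omega, by omega⟩)]

lemma loopA_inv (n : Int) (hb : Bool) :
    ∀ (fuel : Nat) (t r c : Int), 0 ≤ t → t < n → n.toNat ≤ fuel + t.toNat + 1 →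
      ((dDir hb t = true ∧ r = t ∧ c = 0) ∨ (dDir hb t = false ∧ r = 0 ∧ c = t)) →
      loopA fuel n (gridOf n.toNat (Pf hb (t + 1) 0)) ((t + 1) * (t + 1) + 1) r c (dDir hb (t + 1))
        = gridOf n.toNat (fun a b => stepAt hb a b) := by
  intro fuel
  induction fuel with
  | zero =>
    intro t r c ht0 htn hfuel hpos
    exact Pf_full hb n t (by omega)
  | succ f ih =>
    intro t r c ht0 htn hfuel hpos
    have hds := dDir_succ hb t
    by_cases hcont : t + 1 < n
    · have hk : (1 : Int) ≤ t + 1 := by omega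
      have hkN : t + 1 < ((n.toNat : Nat) : Int) := by omega
      have e1 : (((t + 1).toNat : Nat) : Int) = t + 1 := by omega
      cases hD : dDir hb (t + 1)
      · -- layer t+1 has direction false: starts at (t+1, 0)
        have hDt : dDir hb t = true := by
          rw [hD] at hds; simpa using hds.symm
        obtain ⟨h1, h2⟩ : r = t ∧ c = 0 := by
          rcases hpos with ⟨-, h1, h2⟩ | ⟨hf, -, -⟩
          · exact ⟨h1, h2⟩
          · rw [hDt] at hf; cases hf
        rw [h1, h2]
        simp only [loopA]
        rw [if_pos ⟨by omega, by omega⟩]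
        simp only [Bool.false_eq_true, if_false]
        rw [max_eq_left (by omega : (0 : Int) ≤ t + 1)]
        have hG1 : pySet2 (gridOf n.toNat (Pf hb (t + 1) 0)) (t + 1) 0 ((t + 1) * (t + 1) + 1)
            = gridOf n.toNat (Pf hb (t + 1) 1) := by
          rw [pySet2_gridOf n.toNat _ (t + 1) 0 (by omega) (by omega) le_rfl (by omega)]
          have hw := Pf_write hb false (t + 1) hk hD 0 le_rfl (by omega) (t + 1) 0 (by omega)
            le_rfl (max_eq_left (by omega))
            (by unfold lidx; rw [if_neg Bool.false_ne_true, if_pos rfl])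
          rw [show ((t + 1) * (t + 1) + 1 : Int) = (t + 1) * (t + 1) + 1 + 0 by ring, hw]
          norm_num
        rw [hG1, foldl_const _ (fun st => innStep1 false st),
            PySem.List.length_pyRange_one, Int.sub_zero]
        have h1 := iter1f n.toNat hb (t + 1) hk hkN hD (t + 1).toNat (by omega)
        rw [e1] at h1
        rw [show ((t + 1) * (t + 1) + 1 + 1 : Int) = (t + 1) * (t + 1) + 2 by ring, h1]
        rw [foldl_const _ (fun st => innStep2 false st),
            PySem.List.length_pyRange_neg_one, Int.sub_zero]
        have h2 := iter2f n.toNat hb (t + 1) hk hkN hD (t + 1).toNat (by omega)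
        rw [e1] at h2
        rw [show ((1 : Int) + (t + 1)) = (t + 1) + 1 by ring,
            show ((t + 1) * (t + 1) + 2 + (t + 1) : Int) = (t + 1) * (t + 1) + (t + 1) + 2 by ring,
            h2]
        dsimp only
        rw [show ((t + 1) + 1 + (t + 1) : Int) = 2 * (t + 1) + 1 by ring,
            Pf_complete hb (t + 1) hk,
            show ((t + 1) * (t + 1) + (t + 1) + 2 + (t + 1) : Int) = ((t + 1) + 1) * ((t + 1) + 1) + 1 by ring,
            show ((t + 1) - (t + 1) : Int) = 0 by ring,
            show (!false) = dDir hb ((t + 1) + 1) from by rw [dDir_succ hb (t + 1), hD]]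
        exact ih (t + 1) 0 (t + 1) (by omega) (by omega) (by omega) (Or.inr ⟨hD, rfl, rfl⟩)
      · -- layer t+1 has direction true: starts at (0, t+1)
        have hDt : dDir hb t = false := by
          rw [hD] at hds; simpa using hds.symm
        obtain ⟨h1, h2⟩ : r = 0 ∧ c = t := by
          rcases hpos with ⟨hf, -, -⟩ | ⟨-, h1, h2⟩
          · rw [hDt] at hf; cases hf
          · exact ⟨h1, h2⟩
        rw [h1, h2]
        simp only [loopA]
        rw [if_pos ⟨by omega, by omega⟩]
        simp only [eq_self_iff_true, if_true]
        rw [max_eq_right (by omega : (0 : Int) ≤ t + 1)]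
        have hG1 : pySet2 (gridOf n.toNat (Pf hb (t + 1) 0)) 0 (t + 1) ((t + 1) * (t + 1) + 1)
            = gridOf n.toNat (Pf hb (t + 1) 1) := by
          rw [pySet2_gridOf n.toNat _ 0 (t + 1) le_rfl (by omega) (by omega) (by omega)]
          have hw := Pf_write hb true (t + 1) hk hD 0 le_rfl (by omega) 0 (t + 1) le_rfl
            (by omega) (max_eq_right (by omega))
            (by unfold lidx; rw [if_pos rfl, if_pos rfl])
          rw [show ((t + 1) * (t + 1) + 1 : Int) = (t + 1) * (t + 1) + 1 + 0 by ring, hw]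
          norm_num
        rw [hG1, foldl_const _ (fun st => innStep1 true st),
            PySem.List.length_pyRange_one, Int.sub_zero]
        have h1 := iter1t n.toNat hb (t + 1) hk hkN hD (t + 1).toNat (by omega)
        rw [e1] at h1
        rw [show ((t + 1) * (t + 1) + 1 + 1 : Int) = (t + 1) * (t + 1) + 2 by ring, h1]
        rw [foldl_const _ (fun st => innStep2 true st),
            PySem.List.length_pyRange_neg_one, Int.sub_zero]
        have h2 := iter2t n.toNat hb (t + 1) hk hkN hD (t + 1).toNat (by omega)
        rw [e1] at h2
        rw [show ((1 : Int) + (t + 1)) = (t + 1) + 1 by ring,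
            show ((t + 1) * (t + 1) + 2 + (t + 1) : Int) = (t + 1) * (t + 1) + (t + 1) + 2 by ring,
            h2]
        dsimp only
        rw [show ((t + 1) + 1 + (t + 1) : Int) = 2 * (t + 1) + 1 by ring,
            Pf_complete hb (t + 1) hk,
            show ((t + 1) * (t + 1) + (t + 1) + 2 + (t + 1) : Int) = ((t + 1) + 1) * ((t + 1) + 1) + 1 by ring,
            show ((t + 1) - (t + 1) : Int) = 0 by ring,
            show (!true) = dDir hb ((t + 1) + 1) from by rw [dDir_succ hb (t + 1), hD]]
        exact ih (t + 1) (t + 1) 0 (by omega) (by omega) (by omega) (Or.inl ⟨hD, rfl, rfl⟩)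
    · -- t + 1 = n : the while-condition is false, the loop stops
      have hstop : ¬ (r + 1 < n ∧ c + 1 < n) := by
        rcases hpos with ⟨-, rfl, rfl⟩ | ⟨-, rfl, rfl⟩ <;> omega
      simp only [loopA]
      rw [if_neg hstop]
      exact Pf_full hb n t (by omega)

lemma alt_eq_gridOf (n : Int) (h : Bool) :
    solution_alt n h = gridOf n.toNat (fun a b => stepAt h a b) := by
  unfold solution_alt gridOf
  simp [PySem.List.pyRange_one, List.map_map, Function.comp]

-- ===== VERDICT (by name: the statement is the Claim_ definition above) =====
theorem solution_spec : Claim_equal_solution := by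
  intro n h _ hpre
  unfold Pre_solution at hpre
  unfold Spec_solution
  rw [alt_eq_gridOf]
  show loopA n.toNat n
      (pySet2 (List.replicate n.toNat (List.replicate n.toNat 0)) 0 0 1) (1 + 1) 0 0 h
    = gridOf n.toNat (fun a b => stepAt h a b)
  have hrep : List.replicate n.toNat (List.replicate n.toNat (0 : Int))
      = gridOf n.toNat (fun _ _ => 0) := by
    simp [gridOf, List.map_const', List.length_range]
  rw [hrep, pySet2_gridOf n.toNat _ 0 0 le_rfl (by omega) le_rfl (by omega)]
  have hg : (fun a b => if a = (0 : Int).toNat ∧ b = (0 : Int).toNat then (1 : Int)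
                else (fun _ _ => (0 : Int)) a b)
      = Pf h (0 + 1) 0 := by
    funext a b
    by_cases hcell : a = 0 ∧ b = 0
    · obtain ⟨rfl, rfl⟩ := hcell
      simp [Pf, stepAt]
    · have hge : (1 : Int) ≤ max (a : Int) (b : Int) := by
        rcases Nat.eq_zero_or_pos a with rfl | ha
        · rcases Nat.eq_zero_or_pos b with rfl | hb'
          · exact absurd ⟨rfl, rfl⟩ hcell
          · exact le_max_of_le_right (by omega)
        · exact le_max_of_le_left (by omega)
      simp only [Pf, Int.toNat_zero]
      rw [if_neg hcell, if_neg (by omega), if_neg ?_]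
      rintro ⟨hm, hl⟩
      have hak : (a : Int) ≤ 0 + 1 := hm ▸ le_max_left _ _
      have hbk : (b : Int) ≤ 0 + 1 := hm ▸ le_max_right _ _
      revert hl
      unfold lidx
      split_ifs <;> omega
  rw [hg]
  have hmain := loopA_inv n h n.toNat 0 0 0 le_rfl (by omega) (by omega)
    (by rcases Bool.eq_false_or_eq_true (dDir h 0) with hd0 | hd0
        · exact Or.inl ⟨hd0, rfl, rfl⟩
        · exact Or.inr ⟨hd0, rfl, rfl⟩)
  rw [show ((0 + 1) * (0 + 1) + 1 : Int) = 1 + 1 by ring] at hmain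
  rw [show dDir h (0 + 1) = h from by unfold dDir; norm_num] at hmain
  exact hmain
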